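-- pv_equiv track=rewrite | github.com/chubbymaggie/611 | waw_finder.py | waw_finder
-- ===== SOURCE A (Python) =====
-- def waw_finder(parsed_code, destdict, labels):
-- 	destdictrev = sorted(destdict.items(), key = lambda x:x[0], reverse = True)
-- 	waw_dict = {}
-- 	for i in range(0, len(destdictrev)):
-- 		elem = destdictrev[i]
-- 		if elem[1] != None:
-- 			for j in range(i + 1, len(destdictrev)):
-- 				if destdictrev[j][1] != None:
-- 					if destdictrev[j][1] == elem[1]:
-- 						try:
-- 							temp = waw_dict[elem[0]]
-- 							temp.append(destdictrev[j][0])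
-- 							waw_dict[elem[0]] = temp
-- 						except:
-- 							waw_dict[elem[0]] = [destdictrev[j][0]]
--
-- 	return  waw_dict
-- ===== SOURCE B (Python) =====
-- def waw_finder(parsed_code, destdict, labels):
--     # One backward pass over the key-sorted items, keeping for each value the
--     # list of keys already seen (= the keys that come later in descending order).
--     rev = sorted(destdict.items(), key=lambda x: x[0], reverse=True)
--     later = {}   # value -> keys with that value later in rev order
--     out = []
--     for k, v in reversed(rev):
--         if v is not None:
--             cur = later.get(v, [])
--             if cur:
--                 out.append((k, cur))
--             later[v] = [k] + cur
--     out.reverse()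
--     return dict(out)
-- ===== Notes on version B (the rewrite author's own statement) =====
-- stated objective: faster
-- what changed: A's nested quadratic scan (for each item, rescan the whole suffix for equal values) is replaced by a single backward pass over the key-sorted items that keeps, in a dict keyed by value, the list of same-valued keys already seen, so each item's answer is read off in O(1) plus output size.
import Mathlib
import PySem

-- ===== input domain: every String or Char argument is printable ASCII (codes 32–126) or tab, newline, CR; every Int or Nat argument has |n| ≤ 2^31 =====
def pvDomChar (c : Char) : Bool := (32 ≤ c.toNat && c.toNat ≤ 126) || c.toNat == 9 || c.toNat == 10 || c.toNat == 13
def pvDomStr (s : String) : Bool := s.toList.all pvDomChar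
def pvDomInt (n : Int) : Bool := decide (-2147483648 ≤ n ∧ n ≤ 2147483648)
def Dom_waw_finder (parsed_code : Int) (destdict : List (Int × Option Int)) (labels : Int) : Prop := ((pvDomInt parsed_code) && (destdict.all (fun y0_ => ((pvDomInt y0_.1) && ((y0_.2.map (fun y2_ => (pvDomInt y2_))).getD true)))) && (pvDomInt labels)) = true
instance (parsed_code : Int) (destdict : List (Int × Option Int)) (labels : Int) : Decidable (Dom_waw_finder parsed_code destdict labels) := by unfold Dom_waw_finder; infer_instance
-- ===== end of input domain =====

-- B replaces A's quadratic nested scan by one backward pass over the key-sorted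
-- items that keeps, per value, the keys already seen (objective: faster).

-- ===== PORT A =====
-- try: temp = waw_dict[elem[0]]; temp.append(...); waw_dict[elem[0]] = temp  /  except: waw_dict[elem[0]] = [...]
def pvTryAppend (d : PySem.Dict Int (List Int)) (k x : Int) : PySem.Dict Int (List Int) :=
  match d.get? k with
  | some temp => d.insert k (temp ++ [x])
  | none => d.insert k [x]

-- inner loop 'for j in range(i+1, len(destdictrev))' over the suffix after position i
def pvInnerA (d : PySem.Dict Int (List Int)) (k v : Int) (t : List (Int × Option Int)) : PySem.Dict Int (List Int) :=
  t.foldl (fun d q => if q.2 ≠ none then (if q.2 == some v then pvTryAppend d k q.1 else d) else d) d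

-- outer loop 'for i in range(0, len(destdictrev))' as structural recursion over the sorted list
def pvOuterA (d : PySem.Dict Int (List Int)) : List (Int × Option Int) → PySem.Dict Int (List Int)
  | [] => d
  | p :: t => pvOuterA (match p.2 with | none => d | some v => pvInnerA d p.1 v t) t

def waw_finder (parsed_code : Int) (destdict : List (Int × Option Int)) (labels : Int) : List (Int × List Int) :=
  let destdictrev := PySem.List.sorted (PySem.Dict.ofList destdict).items (fun x => x.1) true
  (pvOuterA PySem.Dict.empty destdictrev).items

-- ===== PORT B =====
-- loop body of 'for k, v in reversed(rev)': state = (later, out)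
def pvStepB (s : PySem.Dict Int (List Int) × List (Int × List Int)) (p : Int × Option Int) :
    PySem.Dict Int (List Int) × List (Int × List Int) :=
  match p.2 with
  | none => s
  | some v =>
    let cur := s.1.getD v []
    let out := if cur ≠ [] then s.2 ++ [(p.1, cur)] else s.2
    (s.1.insert v (p.1 :: cur), out)

def waw_finder_alt (parsed_code : Int) (destdict : List (Int × Option Int)) (labels : Int) : List (Int × List Int) :=
  let rev := PySem.List.sorted (PySem.Dict.ofList destdict).items (fun x => x.1) true
  let s := rev.reverse.foldl pvStepB (PySem.Dict.empty, [])
  (PySem.Dict.ofList s.2.reverse).items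

-- ===== PRECONDITION & SPEC =====
def Spec_waw_finder (parsed_code : Int) (destdict : List (Int × Option Int)) (labels : Int) (out : List (Int × List Int)) : Prop := out = waw_finder_alt parsed_code destdict labels
instance (parsed_code : Int) (destdict : List (Int × Option Int)) (labels : Int) (out : List (Int × List Int)) : Decidable (Spec_waw_finder parsed_code destdict labels out) := by unfold Spec_waw_finder; infer_instance

-- ===== CLAIM (what is proved, stated in full; the proofs are below) =====
def Claim_equal_waw_finder : Prop := ∀ (parsed_code : Int) (destdict : List (Int × Option Int)) (labels : Int), Dom_waw_finder parsed_code destdict labels → Spec_waw_finder parsed_code destdict labels (waw_finder parsed_code destdict labels)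

-- ===== LEMMAS AND PROOFS =====

-- keys of l whose value is 'some v', in order
def pvKeysWith (l : List (Int × Option Int)) (v : Int) : List Int :=
  (l.filter (fun q => q.2 == some v)).map (·.1)

-- common specification: per entry with value some v, the later same-valued keys (if any)
def pvSpec : List (Int × Option Int) → List (Int × List Int)
  | [] => []
  | p :: t =>
    (match p.2 with
     | none => []
     | some v => if pvKeysWith t v = [] then [] else [(p.1, pvKeysWith t v)]) ++ pvSpec t

theorem pvTryAppend_eq (d : PySem.Dict Int (List Int)) (k x : Int) :
    pvTryAppend d k x = d.insert k (d.getD k [] ++ [x]) := by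
  unfold pvTryAppend
  cases h : d.get? k <;> simp [PySem.Dict.getD_eq_get?_getD, h]

theorem pvKeysWith_cons (p : Int × Option Int) (t : List (Int × Option Int)) (v : Int) :
    pvKeysWith (p :: t) v =
      (if p.2 = some v then [p.1] else []) ++ pvKeysWith t v := by
  unfold pvKeysWith
  by_cases h : p.2 = some v <;> simp [h]

theorem pvInnerA_eq (k v : Int) (t : List (Int × Option Int)) :
    ∀ d, pvInnerA d k v t =
      if pvKeysWith t v = [] then d else d.insert k (d.getD k [] ++ pvKeysWith t v) := by
  induction t with
  | nil => intro d; simp [pvInnerA, pvKeysWith]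
  | cons q t ih =>
    intro d
    rw [pvInnerA, List.foldl_cons, ← pvInnerA, pvKeysWith_cons]
    by_cases hq : q.2 = some v
    · have hstep : (if q.2 ≠ none then (if q.2 == some v then pvTryAppend d k q.1 else d) else d)
          = pvTryAppend d k q.1 := by simp [hq]
      rw [hstep, if_pos hq, pvTryAppend_eq, ih]
      by_cases hm : pvKeysWith t v = []
      · simp [hm]
      · rw [if_neg hm, if_neg (by simp), PySem.Dict.getD_insert_self,
          PySem.Dict.insert_insert_self]
        simp
    · have hstep : (if q.2 ≠ none then (if q.2 == some v then pvTryAppend d k q.1 else d) else d)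
          = d := by
        cases hn : q.2 with
        | none => simp
        | some w =>
          have hw : ¬ w = v := fun h => hq (by rw [hn, h])
          simp [hw]
      rw [hstep, if_neg hq, List.nil_append]
      exact ih d

theorem pvOuterA_eq (l : List (Int × Option Int)) :
    ∀ d : PySem.Dict Int (List Int), (l.map (·.1)).Nodup →
      (∀ p ∈ l, d.contains p.1 = false) →
      (pvOuterA d l).items = d.items ++ pvSpec l := by
  induction l with
  | nil => intro d _ _; simp [pvOuterA, pvSpec]
  | cons p t ih =>
    intro d hnd hfresh
    have hnd' : (t.map (·.1)).Nodup := (List.nodup_cons.mp hnd).2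
    have hknot : p.1 ∉ t.map (·.1) := (List.nodup_cons.mp hnd).1
    cases hp : p.2 with
    | none =>
      rw [pvOuterA]
      simp only [hp]
      rw [ih d hnd' (fun q hq => hfresh q (List.mem_cons_of_mem _ hq))]
      simp [pvSpec, hp]
    | some v =>
      rw [pvOuterA]
      simp only [hp]
      have hc : d.contains p.1 = false := hfresh p (List.mem_cons_self ..)
      have hg : d.getD p.1 [] = [] := PySem.Dict.getD_of_not_contains _ _ hc
      rw [pvInnerA_eq, hg]
      by_cases hm : pvKeysWith t v = []
      · simp only [hm, if_true]
        rw [ih d hnd' (fun q hq => hfresh q (List.mem_cons_of_mem _ hq))]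
        simp [pvSpec, hp, hm]
      · simp only [hm, if_false, List.nil_append]
        have hfresh' : ∀ q ∈ t, (d.insert p.1 (pvKeysWith t v)).contains q.1 = false := by
          intro q hq
          rw [PySem.Dict.contains_insert]
          have hne : (q.1 == p.1) = false := by
            simp only [beq_eq_false_iff_ne, ne_eq]
            intro h; exact hknot (h ▸ List.mem_map_of_mem hq)
          rw [hne, hfresh q (List.mem_cons_of_mem _ hq)]; rfl
        rw [ih _ hnd' hfresh', PySem.Dict.items_insert_of_not_contains _ _ hc]
        simp [pvSpec, hp, hm]

theorem pvStepB_inv (l : List (Int × Option Int)) :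
    (∀ v, (l.reverse.foldl pvStepB (PySem.Dict.empty, [])).1.getD v [] = pvKeysWith l v) ∧
      (l.reverse.foldl pvStepB (PySem.Dict.empty, [])).2.reverse = pvSpec l := by
  induction l with
  | nil => constructor <;> simp [pvSpec, pvKeysWith, PySem.Dict.getD_empty]
  | cons p t ih =>
    obtain ⟨ih1, ih2⟩ := ih
    rw [List.reverse_cons, List.foldl_append, List.foldl_cons, List.foldl_nil]
    set st := t.reverse.foldl pvStepB ((PySem.Dict.empty : PySem.Dict Int (List Int)),
      ([] : List (Int × List Int))) with hst
    cases hp : p.2 with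
    | none =>
      constructor
      · intro v
        simp only [pvStepB, hp]
        rw [ih1, pvKeysWith_cons, hp]
        simp
      · simp only [pvStepB, hp]
        rw [ih2, pvSpec]
        simp [hp]
    | some w =>
      constructor
      · intro v
        simp only [pvStepB, hp]
        rw [PySem.Dict.getD_insert, pvKeysWith_cons, hp]
        by_cases hv : v = w
        · subst hv; simp [ih1]
        · simp [hv, Ne.symm hv, ih1]
      · simp only [pvStepB, hp]
        rw [pvSpec]
        simp only [hp, ih1]
        by_cases hm : pvKeysWith t w = []
        · simp [hm, ih2]
        · simp [hm, ih2]

theorem pvSpec_keys_sublist (l : List (Int × Option Int)) :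
    ((pvSpec l).map (·.1)).Sublist (l.map (·.1)) := by
  induction l with
  | nil => simp [pvSpec]
  | cons p t ih =>
    rw [pvSpec]
    cases hp : p.2 with
    | none =>
      simp only [List.nil_append, List.map_cons]
      exact List.Sublist.cons p.1 ih
    | some v =>
      by_cases hm : pvKeysWith t v = []
      · simp only [hm, if_true, List.nil_append, List.map_cons]
        exact List.Sublist.cons p.1 ih
      · simp only [hm, if_false, List.map_cons, List.cons_append, List.nil_append]
        exact List.Sublist.cons₂ p.1 ih

theorem pvItems_ofList (xs : List (Int × List Int)) (h : (xs.map (·.1)).Nodup) :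
    (PySem.Dict.ofList xs).items = xs := by
  have := PySem.Dict.items_foldl_insert_fresh (l := xs) (k := (·.1)) (v := (·.2))
    (d := PySem.Dict.empty) (fun a _ => PySem.Dict.contains_empty _) h
  simpa [PySem.Dict.ofList, PySem.Dict.update] using this

-- ===== VERDICT (by name: the statement is the Claim_ definition above) =====
theorem waw_finder_spec : Claim_equal_waw_finder := by
  intro parsed_code destdict labels _
  unfold Spec_waw_finder waw_finder waw_finder_alt
  set rev := PySem.List.sorted (PySem.Dict.ofList destdict).items (fun x => x.1) true with hrev
  have hperm : rev.Perm (PySem.Dict.ofList destdict).items := PySem.List.sorted_perm ..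
  have hk' : ((PySem.Dict.ofList destdict).items.map (fun x => x.1)).Nodup := by
    simpa [PySem.Dict.keys] using PySem.Dict.nodup_keys_ofList destdict
  have hnd : (rev.map (fun x => x.1)).Nodup := ((hperm.map _).nodup_iff).mpr hk'
  show (pvOuterA PySem.Dict.empty rev).items
      = (PySem.Dict.ofList ((rev.reverse.foldl pvStepB (PySem.Dict.empty, [])).2.reverse)).items
  rw [pvOuterA_eq rev PySem.Dict.empty hnd (fun q _ => PySem.Dict.contains_empty _),
    (pvStepB_inv rev).2, pvItems_ofList _ (hnd.sublist (pvSpec_keys_sublist rev))]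
  simp [PySem.Dict.empty]
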